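-- pv_equiv track=rewrite | github.com/XavierAgostino/cfp-selection-simulator | src/utils/metrics.py | calculate_quality_wins
-- ===== SOURCE A (Python) =====
-- from typing import Dict, List, Tuple, Optional
--
-- def calculate_quality_wins(
--     opponent_ranks: List[int],
--     thresholds: Dict[str, int] = None
-- ) -> Dict[str, int]:
--     """
--     Calculate quality wins at various thresholds.
--
--     Parameters
--     ----------
--     opponent_ranks : list of int
--         Ranks of beaten opponents
--     thresholds : dict, optional
--         Dictionary of threshold names to rank cutoffs
--         Default: {'top_5': 5, 'top_12': 12, 'top_25': 25}
--
--     Returns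
--     -------
--     dict
--         Count of quality wins at each threshold
--     """
--     if thresholds is None:
--         thresholds = {'top_5': 5, 'top_12': 12, 'top_25': 25}
--
--     quality_wins = {}
--     for name, cutoff in thresholds.items():
--         quality_wins[name] = sum(1 for rank in opponent_ranks if rank <= cutoff)
--
--     return quality_wins
-- ===== SOURCE B (Python) =====
-- def calculate_quality_wins(opponent_ranks, thresholds=None):
--     if thresholds is None:
--         thresholds = {'top_5': 5, 'top_12': 12, 'top_25': 25}
--     items = list(thresholds.items())
--     counts = [0] * len(items)
--     for rank in opponent_ranks:
--         counts = [c + 1 if rank <= cutoff else c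
--                   for (_, cutoff), c in zip(items, counts)]
--     result = {}
--     for (name, _), c in zip(items, counts):
--         result[name] = c
--     return result
-- ===== Notes on version B (the rewrite author's own statement) =====
-- stated objective: alternative
-- what changed: B interchanges the loops: instead of A's full scan of the rank list once per threshold, B makes a single pass over the ranks maintaining one counter per threshold (updated simultaneously), then assembles the dict from the threshold/counter pairs.
import Mathlib
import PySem

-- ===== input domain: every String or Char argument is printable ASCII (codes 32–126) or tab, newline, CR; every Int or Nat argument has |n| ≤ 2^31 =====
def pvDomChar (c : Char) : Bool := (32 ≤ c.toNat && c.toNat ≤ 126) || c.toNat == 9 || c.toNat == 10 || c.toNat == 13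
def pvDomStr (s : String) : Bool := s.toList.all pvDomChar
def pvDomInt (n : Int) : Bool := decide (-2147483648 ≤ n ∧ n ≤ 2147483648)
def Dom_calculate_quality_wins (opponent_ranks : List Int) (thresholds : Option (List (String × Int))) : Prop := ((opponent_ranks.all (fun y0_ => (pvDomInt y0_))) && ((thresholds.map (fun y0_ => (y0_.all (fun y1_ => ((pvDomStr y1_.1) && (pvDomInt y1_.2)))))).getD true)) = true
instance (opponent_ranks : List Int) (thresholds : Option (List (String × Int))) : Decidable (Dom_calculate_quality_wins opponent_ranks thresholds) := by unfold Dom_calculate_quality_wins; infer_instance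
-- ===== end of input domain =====

-- B interchanges the loops: one pass over the ranks updating a counter per threshold,
-- instead of A's full rank-list scan per threshold; same returned dict (objective: alternative).

-- ===== PORT A =====
def calculate_quality_wins (opponent_ranks : List Int) (thresholds : Option (List (String × Int))) : List (String × Int) :=
  -- if thresholds is None: thresholds = {'top_5': 5, 'top_12': 12, 'top_25': 25}
  let th := thresholds.getD [("top_5", 5), ("top_12", 12), ("top_25", 25)]
  -- quality_wins = {}; for name, cutoff in thresholds.items(): quality_wins[name] = sum(1 for rank in opponent_ranks if rank <= cutoff)
  (th.foldl
    (fun d p =>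
      d.insert p.1 (((opponent_ranks.filter (fun rank => rank ≤ p.2)).map (fun _ => (1 : Int))).sum))
    PySem.Dict.empty).items

-- ===== PORT B =====
def calculate_quality_wins_alt (opponent_ranks : List Int) (thresholds : Option (List (String × Int))) : List (String × Int) :=
  let items := thresholds.getD [("top_5", 5), ("top_12", 12), ("top_25", 25)]
  -- counts = [0] * len(items)
  -- for rank in opponent_ranks: counts = [c+1 if rank <= cutoff else c for (_, cutoff), c in zip(items, counts)]
  let counts : List Int :=
    opponent_ranks.foldl
      (fun cs rank => List.zipWith (fun (p : String × Int) c => if rank ≤ p.2 then c + 1 else c) items cs)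
      (items.map (fun _ => (0 : Int)))
  -- result = {}; for (name, _), c in zip(items, counts): result[name] = c
  ((items.zip counts).foldl
    (fun d (q : (String × Int) × Int) => d.insert q.1.1 q.2)
    PySem.Dict.empty).items

-- ===== PRECONDITION & SPEC =====
def Spec_calculate_quality_wins (opponent_ranks : List Int) (thresholds : Option (List (String × Int))) (out : List (String × Int)) : Prop := out = calculate_quality_wins_alt opponent_ranks thresholds
instance (opponent_ranks : List Int) (thresholds : Option (List (String × Int))) (out : List (String × Int)) : Decidable (Spec_calculate_quality_wins opponent_ranks thresholds out) := by unfold Spec_calculate_quality_wins; infer_instance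

-- ===== CLAIM =====
def Claim_equal_calculate_quality_wins : Prop := ∀ (opponent_ranks : List Int) (thresholds : Option (List (String × Int))), Dom_calculate_quality_wins opponent_ranks thresholds → Spec_calculate_quality_wins opponent_ranks thresholds (calculate_quality_wins opponent_ranks thresholds)

-- ===== LEMMAS AND PROOFS =====

-- zipWith of a list against a map of itself is a map.
theorem zipWith_map_self {α β γ : Type} (f : α → β → γ) (g : α → β) (l : List α) :
    List.zipWith f l (l.map g) = l.map (fun a => f a (g a)) := by
  induction l with
  | nil => rfl
  | cons a l ih => simp [ih]

-- B's simultaneous-counter pass: after folding xs, each item's counter holds its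
-- initial value plus the number of ranks in xs at or below its cutoff.
theorem counts_invariant (items : List (String × Int)) (xs : List Int) (g : String × Int → Int) :
    xs.foldl
      (fun cs rank => List.zipWith (fun (p : String × Int) c => if rank ≤ p.2 then c + 1 else c) items cs)
      (items.map g)
    = items.map (fun p => g p + (xs.countP (fun r => decide (r ≤ p.2)) : Int)) := by
  induction xs generalizing g with
  | nil => simp
  | cons x xs ih =>
    rw [List.foldl_cons, zipWith_map_self, ih]
    apply List.map_congr_left
    intro p _
    rw [List.countP_cons]
    by_cases h : x ≤ p.2 <;> simp [h]
    · ring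

-- A's per-threshold 0/1-sum is the same count.
theorem sum_ones_eq_countP (xs : List Int) (c : Int) :
    ((xs.filter (fun rank => rank ≤ c)).map (fun _ => (1 : Int))).sum
      = (xs.countP (fun r => decide (r ≤ c)) : Int) := by
  simp [List.countP_eq_length_filter, List.map_const', List.sum_replicate]

-- ===== VERDICT =====
theorem calculate_quality_wins_spec : Claim_equal_calculate_quality_wins := by
  intro opponent_ranks thresholds _
  unfold Spec_calculate_quality_wins calculate_quality_wins calculate_quality_wins_alt
  dsimp only
  rw [counts_invariant]
  generalize thresholds.getD [("top_5", 5), ("top_12", 12), ("top_25", 25)] = items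
  have hzip : ∀ (l : List (String × Int)) (f : String × Int → Int),
      l.zip (l.map f) = l.map (fun p => (p, f p)) := by
    intro l f
    induction l with
    | nil => simp
    | cons a l ih => simp [ih]
  rw [hzip, List.foldl_map]
  have hf :
      (fun (d : PySem.Dict String Int) (p : String × Int) =>
        d.insert p.1 (((opponent_ranks.filter (fun rank => rank ≤ p.2)).map (fun _ => (1 : Int))).sum))
      = (fun (d : PySem.Dict String Int) (p : String × Int) =>
        d.insert p.1 ((0 : Int) + (opponent_ranks.countP (fun r => decide (r ≤ p.2)) : Int))) := by
    funext d p
    rw [sum_ones_eq_countP, zero_add]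
  rw [hf]
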